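-- pv_equiv track=rewrite | github.com/MrBrantCode/unitest_baseline | mut_generate/mist_train_taco/taco_8086/solution.py | minimum_operations_to_equalize_chemicals
-- ===== SOURCE A (Python) =====
-- def minimum_operations_to_equalize_chemicals(n, volumes):
--     # Convert each volume to its binary representation and strip the '0b' prefix
--     binary_representations = [bin(volume)[2:] for volume in volumes]
--
--     # Get the lengths of the binary representations
--     lengths = [len(binary_rep) for binary_rep in binary_representations]
--
--     # Find the maximum and minimum lengths of the binary representations
--     max_len = max(lengths)
--     min_len = min(lengths)
--
--     # Initialize the location and flag for checking common prefix
--     loc = 0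
--     flag = False
--
--     # Find the longest common prefix in the binary representations
--     for j in range(min_len):
--         for i in range(n):
--             if binary_representations[i][j] != binary_representations[0][j]:
--                 flag = True
--                 break
--         if flag:
--             break
--         loc += 1
--
--     # Calculate the initial result based on the common prefix
--     result = sum(lengths) - loc * n
--     best = result
--
--     # Initialize a list to track changes needed for each chemical
--     change = [0] * n
--
--     # Iterate over the remaining bits to calculate the minimum operations
--     for j in range(loc, max_len):
--         for i in range(n):
--             if j >= lengths[i] or binary_representations[i][j] == '1':
--                 change[i] = 1
--         result += sum(change)
--         if result > best:
--             break
--         best = result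
--
--     return best
-- ===== SOURCE B (Python) =====
-- def minimum_operations_to_equalize_chemicals(n, volumes):
--     # The accumulation phase of the original never changes the returned value:
--     # the answer is always sum(lengths) - loc * n, where loc is the length of the
--     # common prefix (capped at the shortest representation) of the first n
--     # binary representations.
--     reps = [bin(v)[2:] for v in volumes]
--     lengths = [len(r) for r in reps]
--     loc = min(lengths)
--     first = reps[0]
--     for i in range(1, n):
--         r = reps[i]
--         k = 0
--         while k < loc and r[k] == first[k]:
--             k += 1
--         loc = k
--     return sum(lengths) - loc * n
-- ===== Notes on version B (the rewrite author's own statement) =====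
-- stated objective: simpler
-- what changed: B drops A's entire second accumulation loop (proved to never change the returned value, since the first added sum(change) already breaks it) and computes the common-prefix length per string with a while-loop capped by the running minimum instead of A's column-by-column nested scan with flag/break, returning sum(lengths) - loc*n directly.
import Mathlib
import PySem

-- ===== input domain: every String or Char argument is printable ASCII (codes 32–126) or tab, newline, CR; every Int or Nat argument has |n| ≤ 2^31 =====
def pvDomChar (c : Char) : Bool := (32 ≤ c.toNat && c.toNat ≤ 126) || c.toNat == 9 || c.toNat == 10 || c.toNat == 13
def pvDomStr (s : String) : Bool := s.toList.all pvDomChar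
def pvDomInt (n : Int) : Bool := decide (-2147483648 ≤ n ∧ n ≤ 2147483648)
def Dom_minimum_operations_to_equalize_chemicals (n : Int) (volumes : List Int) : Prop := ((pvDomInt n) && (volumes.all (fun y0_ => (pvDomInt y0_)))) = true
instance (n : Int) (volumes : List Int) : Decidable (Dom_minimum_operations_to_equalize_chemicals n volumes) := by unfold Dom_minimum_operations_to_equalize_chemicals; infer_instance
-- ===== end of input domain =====

-- B drops A's dead accumulation phase (it never changes the returned value) and finds the
-- common-prefix length per string instead of column-by-column: objective 'simpler', no speed claim.

-- ===== PORT A =====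
-- bin(v)[2:] : for v ≥ 0 the binary digits, for v < 0 Python's '-0b101'[2:] = 'b101'
def pvBinDrop2 (v : Int) : List Char := (PySem.Int.toBinChars0b v).drop 2

-- binary_representations[i][j] read via pyGet?, with a default never reached on admitted indices
def pvChAt (reps : List (List Char)) (i j : Int) : Char :=
  (PySem.List.pyGet? ((PySem.List.pyGet? reps i).getD []) j).getD ' '

-- inner 'for i in range(n): if reps[i][j] != reps[0][j]: flag = True; break'
def pvAInner (reps : List (List Char)) (j : Int) : List Int → Bool
  | [] => false
  | i :: is => if pvChAt reps i j ≠ pvChAt reps 0 j then true else pvAInner reps j is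

-- outer 'for j in range(min_len): … if flag: break; loc += 1'
def pvAOuter (reps : List (List Char)) (iIdx : List Int) : List Int → Int → Int
  | [], loc => loc
  | j :: js, loc => if pvAInner reps j iIdx then loc else pvAOuter reps iIdx js (loc + 1)

-- 'for i in range(n): if j >= lengths[i] or reps[i][j] == '1': change[i] = 1'  (i from range(n) is ≥ 0, so .toNat is exact)
def pvUpd (reps : List (List Char)) (lengths : List Int) (j : Int) : List Int → List Int → List Int
  | change, [] => change
  | change, i :: is =>
      pvUpd reps lengths j
        (if j ≥ (PySem.List.pyGet? lengths i).getD 0 ∨ pvChAt reps i j = '1'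
         then change.set i.toNat 1 else change) is

-- 'for j in range(loc, max_len): …; result += sum(change); if result > best: break; best = result'
def pvASecond (reps : List (List Char)) (lengths : List Int) (iIdx : List Int) :
    List Int → List Int → Int → Int → Int
  | [], _change, _result, best => best
  | j :: js, change, result, best =>
      let change' := pvUpd reps lengths j change iIdx
      let result' := result + change'.sum
      if result' > best then best else pvASecond reps lengths iIdx js change' result' result'

def minimum_operations_to_equalize_chemicals (n : Int) (volumes : List Int) : Int :=
  let reps := volumes.map pvBinDrop2
  let lengths := reps.map (fun r => (r.length : Int))
  match PySem.List.max? lengths (fun x => x), PySem.List.min? lengths (fun x => x) with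
  | some maxLen, some minLen =>
      let iIdx := PySem.List.pyRange 0 n 1
      let loc := pvAOuter reps iIdx (PySem.List.pyRange 0 minLen 1) 0
      let result := lengths.sum - loc * n
      pvASecond reps lengths iIdx (PySem.List.pyRange loc maxLen 1) (List.replicate n.toNat 0) result result
  | _, _ => 0  -- max()/min() of an empty list: Python raises ValueError (excluded by Pre_)

-- ===== PORT B =====
-- 'k = 0; while k < loc and r[k] == first[k]: k += 1'
def pvBWhile (r first : List Char) (cap k : Int) : Int :=
  if h : k < cap ∧ (PySem.List.pyGet? r k).getD ' ' = (PySem.List.pyGet? first k).getD ' ' then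
    pvBWhile r first cap (k + 1)
  else k
termination_by (cap - k).toNat
decreasing_by omega

-- 'for i in range(1, n): …; loc = k'
def pvBFold (reps : List (List Char)) (first : List Char) : List Int → Int → Int
  | [], loc => loc
  | i :: is, loc =>
      pvBFold reps first is (pvBWhile ((PySem.List.pyGet? reps i).getD []) first loc 0)

def minimum_operations_to_equalize_chemicals_alt (n : Int) (volumes : List Int) : Int :=
  let reps := volumes.map pvBinDrop2
  let lengths := reps.map (fun r => (r.length : Int))
  match PySem.List.min? lengths (fun x => x) with
  | some minLen =>
      let first := (PySem.List.pyGet? reps 0).getD []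
      let loc := pvBFold reps first (PySem.List.pyRange 1 n 1) minLen
      lengths.sum - loc * n
  | none => 0  -- min() of an empty list raises in Python (excluded by Pre_)

-- ===== PRECONDITION & SPEC =====
-- Python A raises ValueError on empty volumes and IndexError when n > len(volumes); B raises the same way there.
def Pre_minimum_operations_to_equalize_chemicals (n : Int) (volumes : List Int) : Prop :=
  volumes ≠ [] ∧ n ≤ volumes.length
instance (n : Int) (volumes : List Int) : Decidable (Pre_minimum_operations_to_equalize_chemicals n volumes) := by unfold Pre_minimum_operations_to_equalize_chemicals; infer_instance

def pvWitness_minimum_operations_to_equalize_chemicals : Int × List Int := (2, [5, 3])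

def Spec_minimum_operations_to_equalize_chemicals (n : Int) (volumes : List Int) (out : Int) : Prop := out = minimum_operations_to_equalize_chemicals_alt n volumes
instance (n : Int) (volumes : List Int) (out : Int) : Decidable (Spec_minimum_operations_to_equalize_chemicals n volumes out) := by unfold Spec_minimum_operations_to_equalize_chemicals; infer_instance

-- ===== CLAIM (what is proved, stated in full; the proofs are below) =====
def Claim_equal_minimum_operations_to_equalize_chemicals : Prop := ∀ (n : Int) (volumes : List Int), Dom_minimum_operations_to_equalize_chemicals n volumes → Pre_minimum_operations_to_equalize_chemicals n volumes → Spec_minimum_operations_to_equalize_chemicals n volumes (minimum_operations_to_equalize_chemicals n volumes)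

-- ===== LEMMAS AND PROOFS =====

-- reference loop: first index t in [k, c) failing p (or the end of the interval)
def pvLocSpec (p : Int → Bool) (k c : Int) : Int :=
  if _h : k < c then (if p k then pvLocSpec p (k + 1) c else k) else k
termination_by (c - k).toNat
decreasing_by omega

theorem pvLocSpec_char (p : Int → Bool) (k c : Int) :
    k ≤ pvLocSpec p k c ∧ pvLocSpec p k c ≤ max k c ∧
    (∀ t, k ≤ t → t < pvLocSpec p k c → p t = true) ∧
    (c ≤ pvLocSpec p k c ∨ p (pvLocSpec p k c) = false) := by
  fun_induction pvLocSpec p k c with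
  | case1 =>
      rename_i k hk hp ih
      obtain ⟨h1, h2, h3, h4⟩ := ih
      refine ⟨by omega, by omega, ?_, h4⟩
      intro t ht1 ht2
      rcases eq_or_lt_of_le ht1 with rfl | h
      · exact hp
      · exact h3 t (by omega) ht2
  | case2 =>
      rename_i k hk hp
      exact ⟨le_refl _, by omega, by omega, Or.inr (by simpa using hp)⟩
  | case3 =>
      rename_i k hk
      exact ⟨le_refl _, by omega, by omega, Or.inl (by omega)⟩

theorem pvLocSpec_unique (p : Int → Bool) (k c m : Int)
    (h1 : k ≤ m) (h2 : m ≤ max k c)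
    (h3 : ∀ t, k ≤ t → t < m → p t = true)
    (h4 : c ≤ m ∨ p m = false) :
    pvLocSpec p k c = m := by
  obtain ⟨g1, g2, g3, g4⟩ := pvLocSpec_char p k c
  by_contra hne
  rcases lt_or_gt_of_ne hne with hlt | hgt
  · -- pvLocSpec < m : p (pvLocSpec) = true by h3, and pvLocSpec ≥ c impossible
    rcases g4 with hc | hf
    · omega
    · have := h3 _ g1 hlt; simp [this] at hf
  · rcases h4 with hc | hf
    · omega
    · have := g3 _ h1 hgt; simp [this] at hf

theorem pvLocSpec_congr (p q : Int → Bool) (k c : Int) (h : ∀ t, p t = q t) :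
    pvLocSpec p k c = pvLocSpec q k c := by
  have : p = q := funext h
  subst this; rfl

theorem pvLocSpec_true (c : Int) (hc : 0 ≤ c) : pvLocSpec (fun _ => true) 0 c = c :=
  pvLocSpec_unique _ 0 c c hc (by omega) (fun _ _ _ => rfl) (Or.inl (le_refl _))

-- composing two capped prefix scans is one scan with the conjoined predicate
theorem pvLocSpec_comp (p q : Int → Bool) (c : Int) :
    pvLocSpec p 0 (pvLocSpec q 0 c) = pvLocSpec (fun t => q t && p t) 0 c := by
  obtain ⟨q1, q2, q3, q4⟩ := pvLocSpec_char q 0 c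
  obtain ⟨p1, p2, p3, p4⟩ := pvLocSpec_char p 0 (pvLocSpec q 0 c)
  refine (pvLocSpec_unique _ 0 c _ p1 (by omega) ?_ ?_).symm
  · intro t ht1 ht2
    have hp := p3 t ht1 ht2
    have hq := q3 t ht1 (by omega)
    simp [hp, hq]
  · rcases p4 with hcap | hf
    · rcases q4 with hcc | hqf
      · left; omega
      · right
        have : pvLocSpec p 0 (pvLocSpec q 0 c) = pvLocSpec q 0 c := by omega
        rw [this, hqf]; simp
    · right; simp [hf]

-- the B while-loop IS pvLocSpec on the char-equality predicate
theorem pvBWhile_eq (r first : List Char) (cap k : Int) :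
    pvBWhile r first cap k =
      pvLocSpec (fun t => decide ((PySem.List.pyGet? r t).getD ' ' = (PySem.List.pyGet? first t).getD ' ')) k cap := by
  fun_induction pvBWhile r first cap k with
  | case1 =>
      rename_i k h ih
      rw [pvLocSpec]
      simp only [h.1, dif_pos, h.2, decide_true, if_pos]
      exact ih
  | case2 =>
      rename_i k h
      rw [pvLocSpec]
      by_cases hk : k < cap
      · have hne : ¬ (PySem.List.pyGet? r k).getD ' ' = (PySem.List.pyGet? first k).getD ' ' := by
          intro he; exact h ⟨hk, he⟩
        simp [hk, hne]
      · simp [hk]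

-- the A inner loop is the negated 'all match' over its index list
theorem pvAInner_eq_all (reps : List (List Char)) (j : Int) (is : List Int) :
    pvAInner reps j is = !(is.all (fun i => decide (pvChAt reps i j = pvChAt reps 0 j))) := by
  induction is with
  | nil => rfl
  | cons i is ih =>
      by_cases h : pvChAt reps i j = pvChAt reps 0 j
      · simp [pvAInner, h, ih]
      · simp [pvAInner, h]

-- the A outer loop with accumulator k over range(k, c) is pvLocSpec of its (negated) inner test
theorem pvAOuter_eq (reps : List (List Char)) (iIdx : List Int) (c k : Int) :
    pvAOuter reps iIdx (PySem.List.pyRange k c 1) k =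
      pvLocSpec (fun j => !pvAInner reps j iIdx) k c := by
  by_cases h : k < c
  · rw [PySem.List.pyRange_one_cons h, pvLocSpec]
    simp only [h, dif_pos]
    by_cases hi : pvAInner reps k iIdx
    · simp [pvAOuter, hi]
    · simp only [pvAOuter, hi, if_neg, Bool.not_false, if_pos, Bool.false_eq_true, not_false_eq_true]
      exact pvAOuter_eq reps iIdx c (k + 1)
  · rw [PySem.List.pyRange_one_eq_nil (by omega), pvLocSpec]
    simp [h, pvAOuter]
termination_by (c - k).toNat
decreasing_by omega

-- the B fold accumulates the conjunction of per-string prefix predicates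
theorem pvBFold_eq (reps : List (List Char)) (first : List Char) (is : List Int) (q : Int → Bool)
    (c : Int) :
    pvBFold reps first is (pvLocSpec q 0 c) =
      pvLocSpec (fun j => q j &&
        is.all (fun i => decide ((PySem.List.pyGet? ((PySem.List.pyGet? reps i).getD []) j).getD ' '
            = (PySem.List.pyGet? first j).getD ' '))) 0 c := by
  induction is generalizing q with
  | nil => simp [pvBFold]
  | cons i is ih =>
      simp only [pvBFold]
      rw [pvBWhile_eq, pvLocSpec_comp, ih]
      refine pvLocSpec_congr _ _ 0 c ?_
      intro t
      simp [Bool.and_assoc]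

-- entries of change stay ≥ 0 through an update pass
theorem pvUpd_nonneg (reps : List (List Char)) (lengths : List Int) (j : Int)
    (is : List Int) (change : List Int) (h : ∀ x ∈ change, 0 ≤ x) :
    ∀ x ∈ pvUpd reps lengths j change is, 0 ≤ x := by
  induction is generalizing change with
  | nil => exact h
  | cons i is ih =>
      simp only [pvUpd]
      apply ih
      split
      · intro x hx
        rcases List.mem_or_eq_of_mem_set hx with hmem | rfl
        · exact h x hmem
        · norm_num
      · exact h

-- A's accumulation loop never changes the value it returns: entered with result = best and a
-- nonnegative change list, it returns best
theorem pvASecond_id (reps : List (List Char)) (lengths : List Int) (iIdx : List Int)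
    (js : List Int) (change : List Int) (b : Int) (h : ∀ x ∈ change, 0 ≤ x) :
    pvASecond reps lengths iIdx js change b b = b := by
  induction js generalizing change with
  | nil => rfl
  | cons j js ih =>
      simp only [pvASecond]
      have hn : ∀ x ∈ pvUpd reps lengths j change iIdx, 0 ≤ x := pvUpd_nonneg _ _ _ _ _ h
      have hs : 0 ≤ (pvUpd reps lengths j change iIdx).sum := List.sum_nonneg hn
      by_cases hgt : b + (pvUpd reps lengths j change iIdx).sum > b
      · simp [hgt]
      · have hz : (pvUpd reps lengths j change iIdx).sum = 0 := by omega
        simp only [hz, add_zero, gt_iff_lt, lt_self_iff_false, if_false]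
        exact ih _ hn

-- replicate 0 is nonnegative
theorem pvReplicate_nonneg (m : Nat) : ∀ x ∈ List.replicate m (0 : Int), 0 ≤ x := by
  intro x hx
  rw [List.eq_of_mem_replicate hx]

-- i = 0 always matches itself, so range(0, n) and range(1, n) give the same inner test
theorem pvAInner_drop_zero (reps : List (List Char)) (j n : Int) (hn : 1 ≤ n) :
    pvAInner reps j (PySem.List.pyRange 0 n 1) = pvAInner reps j (PySem.List.pyRange 1 n 1) := by
  rw [PySem.List.pyRange_one_cons (by omega : (0:Int) < n)]
  simp [pvAInner]

-- ===== VERDICT (by name: the statement is the Claim_ definition above) =====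
theorem minimum_operations_to_equalize_chemicals_spec : Claim_equal_minimum_operations_to_equalize_chemicals := by
  intro n volumes _hdom hpre
  unfold Spec_minimum_operations_to_equalize_chemicals
  obtain ⟨hne, _hn⟩ := hpre
  obtain ⟨v, vs, rfl⟩ := List.exists_cons_of_ne_nil hne
  simp only [minimum_operations_to_equalize_chemicals, minimum_operations_to_equalize_chemicals_alt,
    List.map_cons, PySem.List.min?_id_cons, PySem.List.max?_id_cons]
  set reps := pvBinDrop2 v :: List.map pvBinDrop2 vs with hreps
  set lengths := ((pvBinDrop2 v).length : Int) :: List.map (fun r => ((r.length : Int))) (List.map pvBinDrop2 vs) with hlengths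
  set minLen := List.foldl min ((pvBinDrop2 v).length : Int) (List.map (fun r => ((r.length : Int))) (List.map pvBinDrop2 vs)) with hminLen
  rw [pvASecond_id _ _ _ _ _ _ (pvReplicate_nonneg n.toNat)]
  have hm0 : 0 ≤ minLen := by
    have hmem : minLen ∈ lengths :=
      PySem.List.min?_mem (m := minLen) (by rw [hlengths, PySem.List.min?_id_cons])
    rw [hlengths] at hmem
    rcases List.mem_cons.mp hmem with h | h
    · rw [h]; positivity
    · simp only [List.mem_map] at h
      obtain ⟨r, -, hr⟩ := h
      rw [← hr]; positivity
  have hA := pvAOuter_eq reps (PySem.List.pyRange 0 n 1) minLen 0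
  have hB := pvBFold_eq reps ((PySem.List.pyGet? reps 0).getD []) (PySem.List.pyRange 1 n 1)
      (fun _ => true) minLen
  rw [pvLocSpec_true minLen hm0] at hB
  rw [hA, hB]
  congr 2
  refine pvLocSpec_congr _ _ 0 minLen ?_
  intro j
  by_cases hn1 : 1 ≤ n
  · rw [pvAInner_drop_zero reps j n hn1, pvAInner_eq_all]
    simp only [pvChAt, Bool.not_not, Bool.true_and]
    rfl
  · have h0 : PySem.List.pyRange 0 n 1 = [] := PySem.List.pyRange_one_eq_nil (by omega)
    have h1 : PySem.List.pyRange 1 n 1 = [] := PySem.List.pyRange_one_eq_nil (by omega)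
    simp [h0, h1, pvAInner]
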